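-- pv_equiv track=rewrite | github.com/lucaSartore/genetic-fuzzing-py | src/dataset/output/str_fun.py | str_fun
-- ===== SOURCE A (Python) =====
-- def str_fun(
--     input: str,
--     action: int,
--     reverse: bool,
--     use_second_action: bool,
--     second_action: int,
--     adjacent_str: str
-- ) -> str:
--
--     if reverse:
--         input = input[::-1]
--
--     if action < 0:
--         raise Exception("unsupported action")
--
--     if action > 7:
--         raise Exception("unsupported action")
--
--     # action 0: identity
--     if action == 0:
--         return input
--
--     # action 1: concatenation
--     if action == 1:
--         return input + adjacent_str
--
--     is_number = False
--     if input.isnumeric():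
--         is_number = True
--
--     # action = 2: add one
--     if is_number and action == 2:
--         return str(int(input) + 1)
--
--
--     match = False
--     if input.find(adjacent_str) != -1:
--         match = True
--
--     if action == 3 and match:
--         return adjacent_str
--
--
--     if use_second_action:
--         new_action = second_action
--     else:
--         new_action = action %3
--
--     return str_fun(input + adjacent_str, second_action, reverse, False, 0, adjacent_str)
-- ===== SOURCE B (Python) =====
-- def str_fun(
--     input: str,
--     action: int,
--     reverse: bool,
--     use_second_action: bool,
--     second_action: int,
--     adjacent_str: str
-- ) -> str:
--     # Iterative version: the tail recursion of the original becomes a loop over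
--     # mutable locals.  use_second_action is dead code in the original (new_action
--     # is computed but never used), so it is simply ignored here.
--     while True:
--         if reverse:
--             input = input[::-1]
--         if action < 0 or action > 7:
--             raise Exception("unsupported action")
--         if action == 0:
--             return input
--         if action == 1:
--             return input + adjacent_str
--         if action == 2 and input.isnumeric():
--             return str(int(input) + 1)
--         if action == 3 and adjacent_str in input:
--             return adjacent_str
--         input += adjacent_str
--         action, second_action = second_action, 0
-- ===== Notes on version B (the rewrite author's own statement) =====
-- stated objective: simpler
-- what changed: A's tail recursion (which re-threads reverse/second_action through recursive calls and computes a dead new_action each round) becomes a plain while-loop over the mutable locals input/action/second_action, with the dead use_second_action/new_action code removed.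
import Mathlib
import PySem

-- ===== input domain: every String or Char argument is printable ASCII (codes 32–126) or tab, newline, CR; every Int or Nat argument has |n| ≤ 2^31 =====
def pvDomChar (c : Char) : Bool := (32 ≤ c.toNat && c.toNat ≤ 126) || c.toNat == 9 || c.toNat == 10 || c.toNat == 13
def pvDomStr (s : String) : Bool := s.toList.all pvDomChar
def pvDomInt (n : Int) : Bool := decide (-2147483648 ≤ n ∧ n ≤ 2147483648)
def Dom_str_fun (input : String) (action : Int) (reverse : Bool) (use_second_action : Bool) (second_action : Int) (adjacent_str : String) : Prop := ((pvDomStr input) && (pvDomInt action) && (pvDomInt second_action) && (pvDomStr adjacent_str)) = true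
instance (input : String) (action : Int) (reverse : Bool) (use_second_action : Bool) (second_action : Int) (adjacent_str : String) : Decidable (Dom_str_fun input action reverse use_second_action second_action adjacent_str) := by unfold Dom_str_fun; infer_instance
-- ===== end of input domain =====

-- B replaces A's tail recursion by an iterative loop over mutable locals and drops A's
-- dead `new_action` computation (simpler decomposition, same values everywhere A returns).

-- `if reverse: input = input[::-1]` — the step both versions start with; s[::-1] via
-- PySem.Str.slice?, which is always `some` for step -1 (Str.slice?_none_none_neg_one).
def pyRev (reverse : Bool) (s : String) : String :=
  if reverse then (PySem.Str.slice? s none none (-1)).getD s else s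

-- ===== PORT A =====
-- Literal transliteration of A.  Python `raise` branches return "" here; Pre_str_fun
-- excludes exactly those inputs.  input.isnumeric() is strIsdigit (exact on the ASCII
-- domain); int(input) under that guard always parses, so ofStr? is read with getD 0.
def str_fun (input : String) (action : Int) (reverse : Bool) (use_second_action : Bool) (second_action : Int) (adjacent_str : String) : String :=
  let input := pyRev reverse input
  if action < 0 then ""            -- raise Exception("unsupported action")
  else if action > 7 then ""       -- raise Exception("unsupported action")
  else if _h0 : action = 0 then input
  else if action = 1 then input ++ adjacent_str
  else
    let is_number := PySem.Str.strIsdigit input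
    if is_number = true ∧ action = 2 then PySem.Int.toStr ((PySem.Int.ofStr? input).getD 0 + 1)
    else
      let mtch := PySem.Str.find input adjacent_str ≠ -1
      if action = 3 ∧ mtch then adjacent_str
      else
        let _new_action := if use_second_action then second_action else PySem.Int.mod action 3  -- dead in A, kept
        str_fun (input ++ adjacent_str) second_action reverse false 0 adjacent_str
termination_by (if second_action = 0 then 0 else 1) + (if action = 0 then 0 else 1)
decreasing_by split_ifs <;> omega

-- ===== PORT B =====
-- The while-True loop of Source B: the loop state (input, action, second_action) is the
-- argument of this tail-recursive helper; reverse and adjacent_str never change.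
def strFunGo (reverse : Bool) (adjacent_str : String) (input : String) (action : Int) (second_action : Int) : String :=
  let input := pyRev reverse input
  if action < 0 ∨ action > 7 then ""   -- raise Exception("unsupported action")
  else if _h0 : action = 0 then input
  else if action = 1 then input ++ adjacent_str
  else if action = 2 ∧ PySem.Str.strIsdigit input then PySem.Int.toStr ((PySem.Int.ofStr? input).getD 0 + 1)
  else if action = 3 ∧ PySem.Str.isIn adjacent_str input then adjacent_str
  else strFunGo reverse adjacent_str (input ++ adjacent_str) second_action 0
termination_by (if second_action = 0 then 0 else 1) + (if action = 0 then 0 else 1)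
decreasing_by split_ifs <;> omega

def str_fun_alt (input : String) (action : Int) (reverse : Bool) (use_second_action : Bool) (second_action : Int) (adjacent_str : String) : String :=
  strFunGo reverse adjacent_str input action second_action

-- ===== PRECONDITION & SPEC =====
-- Pre_ excludes exactly the inputs on which A raises "unsupported action": action outside
-- [0,7], or second_action outside [0,7] when the first step falls through to the recursion.
def Pre_str_fun (input : String) (action : Int) (reverse : Bool) (use_second_action : Bool) (second_action : Int) (adjacent_str : String) : Prop :=
  let s := if reverse then String.ofList input.toList.reverse else input
  0 ≤ action ∧ action ≤ 7 ∧
  ((2 ≤ action ∧ ¬(action = 2 ∧ PySem.Str.strIsdigit s = true) ∧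
      ¬(action = 3 ∧ PySem.Str.isIn adjacent_str s = true)) →
    0 ≤ second_action ∧ second_action ≤ 7)
instance (input : String) (action : Int) (reverse : Bool) (use_second_action : Bool) (second_action : Int) (adjacent_str : String) : Decidable (Pre_str_fun input action reverse use_second_action second_action adjacent_str) := by unfold Pre_str_fun; infer_instance

def pvWitness_str_fun : String × Int × Bool × Bool × Int × String := ("ab", 5, true, true, 1, "c")

def Spec_str_fun (input : String) (action : Int) (reverse : Bool) (use_second_action : Bool) (second_action : Int) (adjacent_str : String) (out : String) : Prop := out = str_fun_alt input action reverse use_second_action second_action adjacent_str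
instance (input : String) (action : Int) (reverse : Bool) (use_second_action : Bool) (second_action : Int) (adjacent_str : String) (out : String) : Decidable (Spec_str_fun input action reverse use_second_action second_action adjacent_str out) := by unfold Spec_str_fun; infer_instance

-- ===== CLAIM (what is proved, stated in full; the proofs are below) =====
def Claim_equal_str_fun : Prop := ∀ (input : String) (action : Int) (reverse : Bool) (use_second_action : Bool) (second_action : Int) (adjacent_str : String), Dom_str_fun input action reverse use_second_action second_action adjacent_str → Pre_str_fun input action reverse use_second_action second_action adjacent_str → Spec_str_fun input action reverse use_second_action second_action adjacent_str (str_fun input action reverse use_second_action second_action adjacent_str)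

-- ===== LEMMAS AND PROOFS =====

theorem find_ne_iff_isIn (s t : String) :
    (PySem.Str.find s t ≠ -1) ↔ PySem.Str.isIn t s = true := by
  rw [PySem.Str.find_ne_neg_one_iff, PySem.Str.isIn_iff_infix]

-- A and B agree on ALL inputs (on raise inputs both ports return ""), by induction
-- following A's recursion.
theorem str_fun_eq_go (input : String) (action : Int) (reverse : Bool)
    (use_second_action : Bool) (second_action : Int) (adjacent_str : String) :
    str_fun input action reverse use_second_action second_action adjacent_str =
      strFunGo reverse adjacent_str input action second_action := by
  fun_induction str_fun input action reverse use_second_action second_action adjacent_str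
  case case1 inp h1 =>
    rw [strFunGo]; split_ifs with g1 g2 g3 g4 g5
    · rfl
    all_goals omega
  case case2 inp h1 h2 =>
    rw [strFunGo]; split_ifs with g1 g2 g3 g4 g5
    · rfl
    all_goals omega
  case case3 inp h1 h2 h3 =>
    rw [strFunGo]; split_ifs with g1 g2 g3 g4 g5
    · omega
    · rfl
    all_goals omega
  case case4 inp h1 h2 h3 h4 =>
    rw [strFunGo]; split_ifs with g1 g2 g3 g4
    · omega
    · rfl
    all_goals omega
  case case5 inp h1 h2 h3 h4 isnum h5 =>
    obtain ⟨hb, ha⟩ := h5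
    rw [strFunGo]; split_ifs with g1 g2 g3
    · omega
    · rfl
    · exact absurd g3.1 (by omega)
    · exact absurd ⟨ha, hb⟩ g2
  case case6 inp h1 h2 h3 h4 isnum h5 mtch h6 =>
    rw [strFunGo]; split_ifs with g1 g2 g3
    · exact absurd h6.1 (by omega)
    · exact absurd ⟨g2.2, g2.1⟩ h5
    · rfl
    · exact absurd ⟨h6.1, (find_ne_iff_isIn _ _).mp h6.2⟩ g3
  case case7 inp h1 h2 h3 h4 isnum h5 mtch h6 ih =>
    rw [strFunGo]; split_ifs with g1 g2 g3
    · omega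
    · exact absurd ⟨g2.2, g2.1⟩ h5
    · exact absurd ⟨g3.1, (find_ne_iff_isIn _ _).mpr g3.2⟩ h6
    · exact ih

-- ===== VERDICT (by name: the statement is the Claim_ definition above) =====
theorem str_fun_spec : Claim_equal_str_fun := by
  intro input action reverse use_second_action second_action adjacent_str _ _
  unfold Spec_str_fun str_fun_alt
  exact str_fun_eq_go input action reverse use_second_action second_action adjacent_str
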